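-- pv_equiv track=rewrite | github.com/BioLJ/TransAC4C | util_funcs.py | generate_char
-- ===== SOURCE A (Python) =====
-- import itertools
--
-- def generate_char(letters, length):
--     combinations = itertools.product(letters, repeat=length)
--     char_dict = {}
--     for idx, combo in enumerate(combinations, start=1):
--         char = ''.join(combo)  # 将元组转换为字符串
--         if char not in char_dict:
--             char_dict[char] = []
--         char_dict[char].append(char)
--
--     return char_dict
-- ===== SOURCE B (Python) =====
-- def _decode(letters, rank, length):
--     # the length-digit base-len(letters) representation of rank, as a string
--     L = len(letters)
--     digits = []
--     r = rank
--     for _ in range(length):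
--         r, d = divmod(r, L)
--         digits.append(letters[d])
--     return ''.join(reversed(digits))
--
-- def generate_char(letters, length):
--     # the k-th string of the product order is the base-len(letters) decoding of k
--     total = len(letters) ** length
--     out = {}
--     for rank in range(total):
--         s = _decode(letters, rank, length)
--         out[s] = out.get(s, []) + [s]
--     return out
-- ===== Notes on version B (the rewrite author's own statement) =====
-- stated objective: alternative
-- what changed: Replaces itertools.product plus a guarded-insert dict loop by enumerating ranks 0..len(letters)**length and decoding each rank as a base-len(letters) numeral (string k of the product order is the decoding of k), filling the dict with get-concat; Pre_ excludes negative length, where A raises ValueError.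
import Mathlib
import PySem

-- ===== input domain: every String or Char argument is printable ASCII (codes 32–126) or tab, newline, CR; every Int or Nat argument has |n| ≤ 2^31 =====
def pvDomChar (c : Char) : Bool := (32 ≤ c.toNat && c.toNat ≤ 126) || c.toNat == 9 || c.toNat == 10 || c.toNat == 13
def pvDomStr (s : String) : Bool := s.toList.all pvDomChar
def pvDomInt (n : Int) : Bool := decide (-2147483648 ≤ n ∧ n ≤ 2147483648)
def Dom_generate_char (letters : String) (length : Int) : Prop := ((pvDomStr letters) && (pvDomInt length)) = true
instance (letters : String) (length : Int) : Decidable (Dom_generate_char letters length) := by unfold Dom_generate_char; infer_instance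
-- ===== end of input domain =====

-- B enumerates ranks 0..len(letters)^length and decodes each rank as a base-len(letters)
-- numeral instead of itertools.product, and fills the dict with get-concat instead of a
-- guarded insert plus append (objective: alternative, same cost). Pre_ excludes negative length,
-- where Python A raises ValueError.


-- ===== PORT A =====
-- itertools.product(letters, repeat=length): result = [[]]; for pool in [letters]*length: result = [x+[y] for x in result for y in pool]
def generate_char (letters : String) (length : Int) : List (String × List String) :=
  let combinations :=
    (List.replicate length.toNat letters.toList).foldl
      (fun result pool => result.flatMap (fun x => pool.map (fun y => x ++ [y]))) [[]]
  (combinations.foldl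
    (fun char_dict combo =>
      let char := String.ofList combo
      let char_dict := if char_dict.contains char then char_dict else char_dict.insert char []
      char_dict.modify char [] (fun l => l ++ [char]))
    (PySem.Dict.empty : PySem.Dict String (List String))).items

-- ===== PORT B =====
-- _decode: digits = []; r = rank; for _ in range(length): r, d = divmod(r, L); digits.append(letters[d]); return ''.join(reversed(digits))
-- (letters[d] always has d < L when the loop runs, so getD's default is never taken)
def pyDecode (letters : List Char) (rank : Nat) (length : Nat) : List Char :=
  let L := letters.length
  (((List.range length).foldl
      (fun p _ => (p.1 / L, p.2 ++ [letters.getD (p.1 % L) ' '])) (rank, ([] : List Char))).2).reverse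

-- total = len(letters) ** length; for rank in range(total): s = _decode(...); out[s] = out.get(s, []) + [s]
def generate_char_alt (letters : String) (length : Int) : List (String × List String) :=
  let total := letters.toList.length ^ length.toNat
  ((List.range total).foldl
    (fun out rank =>
      let s := String.ofList (pyDecode letters.toList rank length.toNat)
      out.modify s [] (fun l => l ++ [s]))
    (PySem.Dict.empty : PySem.Dict String (List String))).items

-- ===== PRECONDITION & SPEC =====
-- Pre_ excludes negative length, where Python A raises ValueError (itertools.product repeat < 0)
def Pre_generate_char (_letters : String) (length : Int) : Prop := 0 ≤ length
instance (letters : String) (length : Int) : Decidable (Pre_generate_char letters length) := by unfold Pre_generate_char; infer_instance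
def pvWitness_generate_char : String × Int := ("ab", 2)

def Spec_generate_char (letters : String) (length : Int) (out : List (String × List String)) : Prop := out = generate_char_alt letters length
instance (letters : String) (length : Int) (out : List (String × List String)) : Decidable (Spec_generate_char letters length out) := by unfold Spec_generate_char; infer_instance

-- ===== CLAIM (what is proved, stated in full; the proofs are below) =====
def Claim_equal_generate_char : Prop := ∀ (letters : String) (length : Int), Dom_generate_char letters length → Pre_generate_char letters length → Spec_generate_char letters length (generate_char letters length)

-- ===== LEMMAS AND PROOFS =====

-- all length-n strings over pool, first position varying slowest (B's level construction)
def prodEnum (pool : List Char) : Nat → List (List Char)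
  | 0 => [[]]
  | n + 1 => pool.flatMap (fun c => (prodEnum pool n).map (fun r => c :: r))

-- the one dict step both programs perform per produced string
def addOne (d : PySem.Dict String (List String)) (combo : List Char) : PySem.Dict String (List String) :=
  d.modify (String.ofList combo) [] (fun l => l ++ [String.ofList combo])

-- extending every string on the right reaches the next level of prodEnum
lemma prodEnum_succ_right (pool : List Char) (n : Nat) :
    prodEnum pool (n + 1) = (prodEnum pool n).flatMap (fun x => pool.map (fun y => x ++ [y])) := by
  induction n with
  | zero => simp [prodEnum, Eq.symm List.map_eq_flatMap]
  | succ n ih =>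
      show pool.flatMap (fun c => (prodEnum pool (n + 1)).map (fun r => c :: r)) = _
      conv_lhs => rw [ih]
      simp [prodEnum, List.map_flatMap, List.flatMap_assoc, List.flatMap_map, List.map_map,
        Function.comp_def, List.cons_append]

-- A's product loop enumerates prodEnum
lemma combos_eq_prodEnum (pool : List Char) (n : Nat) :
    (List.replicate n pool).foldl
      (fun result pool => result.flatMap (fun x => pool.map (fun y => x ++ [y]))) [[]]
    = prodEnum pool n := by
  induction n with
  | zero => rfl
  | succ n ih =>
      rw [List.replicate_succ', List.foldl_append, ih, prodEnum_succ_right]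
      rfl

-- structural form of B's digit loop: high digits first, least-significant digit last
def decodeSpec (pool : List Char) : Nat → Nat → List Char
  | 0, _ => []
  | n + 1, r => decodeSpec pool n (r / pool.length) ++ [pool.getD (r % pool.length) ' ']

-- B's fold accumulates exactly the reversed decodeSpec digits
lemma fold_digits (pool : List Char) (len : Nat) : ∀ (rank : Nat) (acc : List Char),
    (((List.range len).foldl
      (fun p _ => (p.1 / pool.length, p.2 ++ [pool.getD (p.1 % pool.length) ' ']))
      (rank, acc)).2)
    = acc ++ (decodeSpec pool len rank).reverse := by
  induction len with
  | zero => intro rank acc; simp [decodeSpec]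
  | succ n ih =>
      intro rank acc
      rw [List.range_succ_eq_map, List.foldl_cons, List.foldl_map]
      rw [ih]
      simp [decodeSpec]

lemma pyDecode_eq (pool : List Char) (rank len : Nat) :
    pyDecode pool rank len = decodeSpec pool len rank := by
  simp only [pyDecode]
  rw [fold_digits]
  simp

-- enumerating a product range digit-by-digit
lemma range_mul_flatMap {α : Type} (L : Nat) (f : Nat → α) (a : Nat) :
    (List.range (a * L)).map f
      = (List.range a).flatMap (fun q => (List.range L).map (fun d => f (q * L + d))) := by
  induction a with
  | zero => simp
  | succ a ih =>
      rw [Nat.succ_mul, List.range_add, List.map_append, ih, List.range_succ,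
        List.flatMap_append]
      simp [List.map_map, Function.comp_def]

-- reading pool back off its indices
lemma map_getD_range (pool : List Char) :
    (List.range pool.length).map (fun d => pool.getD d ' ') = pool := by
  apply List.ext_getElem
  · simp
  · intro i h1 h2
    simp [List.getD_eq_getElem?_getD, h2]

-- rank decoding enumerates prodEnum in order
lemma map_decode_range (pool : List Char) (n : Nat) :
    (List.range (pool.length ^ n)).map (decodeSpec pool n) = prodEnum pool n := by
  induction n with
  | zero => simp [prodEnum, decodeSpec]
  | succ n ih =>
      rw [pow_succ, range_mul_flatMap, prodEnum_succ_right, ← ih, List.flatMap_map]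
      have h : (fun q => (List.range pool.length).map
            (fun d => decodeSpec pool (n + 1) (q * pool.length + d)))
          = (fun q => pool.map (fun y => decodeSpec pool n q ++ [y])) := by
        funext q
        calc (List.range pool.length).map (fun d => decodeSpec pool (n + 1) (q * pool.length + d))
            = (List.range pool.length).map (fun d => decodeSpec pool n q ++ [pool.getD d ' ']) := by
              apply List.map_congr_left
              intro d hd
              have hdL : d < pool.length := List.mem_range.mp hd
              have hL : 0 < pool.length := Nat.lt_of_le_of_lt (Nat.zero_le d) hdL
              have hdiv : (q * pool.length + d) / pool.length = q := by
                rw [Nat.mul_comm, Nat.mul_add_div hL, Nat.div_eq_of_lt hdL, Nat.add_zero]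
              have hmod : (q * pool.length + d) % pool.length = d := by
                rw [Nat.mul_comm, Nat.mul_add_mod, Nat.mod_eq_of_lt hdL]
              simp [decodeSpec, hdiv, hmod]
          _ = ((List.range pool.length).map (fun d => pool.getD d ' ')).map
                (fun y => decodeSpec pool n q ++ [y]) := by rw [List.map_map]; rfl
          _ = pool.map (fun y => decodeSpec pool n q ++ [y]) := by rw [map_getD_range]
      exact congrArg (fun f => List.flatMap f (List.range (pool.length ^ n))) h


-- A's per-string step (guarded insert of [] then append) equals B's get-concat step
lemma stepA_eq_addOne (d : PySem.Dict String (List String)) (combo : List Char) :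
    (let char := String.ofList combo
     let d' := if d.contains char then d else d.insert char []
     d'.modify char [] (fun l => l ++ [char])) = addOne d combo := by
  by_cases h : d.contains (String.ofList combo)
  · simp [h, addOne]
  · have hf : d.contains (String.ofList combo) = false := by simpa using h
    simp [addOne, PySem.Dict.modify, hf, PySem.Dict.getD_insert_self,
      PySem.Dict.insert_insert_self, PySem.Dict.getD_of_not_contains d [] hf]

-- ===== VERDICT (by name: the statement is the Claim_ definition above) =====
theorem generate_char_spec : Claim_equal_generate_char := by
  intro letters length _ _
  unfold Spec_generate_char generate_char generate_char_alt
  rw [combos_eq_prodEnum]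
  refine congrArg PySem.Dict.items ?_
  calc List.foldl
        (fun char_dict combo =>
          let char := String.ofList combo
          let char_dict := if char_dict.contains char then char_dict else char_dict.insert char []
          char_dict.modify char [] (fun l => l ++ [char]))
        PySem.Dict.empty (prodEnum letters.toList length.toNat)
      = List.foldl addOne PySem.Dict.empty (prodEnum letters.toList length.toNat) :=
        PySem.List.foldl_congr_mem _ _ _ _ (fun acc x _ => stepA_eq_addOne acc x)
    _ = List.foldl addOne PySem.Dict.empty
          ((List.range (letters.toList.length ^ length.toNat)).map
            (decodeSpec letters.toList length.toNat)) := by rw [map_decode_range]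
    _ = List.foldl
          (fun out rank => addOne out (decodeSpec letters.toList length.toNat rank))
          PySem.Dict.empty (List.range (letters.toList.length ^ length.toNat)) := by
        rw [List.foldl_map]
    _ = List.foldl
          (fun out rank =>
            let s := String.ofList (pyDecode letters.toList rank length.toNat)
            out.modify s [] (fun l => l ++ [s]))
          PySem.Dict.empty (List.range (letters.toList.length ^ length.toNat)) :=
        PySem.List.foldl_congr_mem _ _ _ _
          (fun acc x _ => by simp [addOne, pyDecode_eq])
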